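-- pv_equiv track=rewrite | github.com/jslusarczykk/pythonuczelnia | kolos 2/p2.py | f
-- ===== SOURCE A (Python) =====
-- def f(d): #remaining people in room
--     count=0
--     for i in range(len(d)):
--         if(d[i]=="+"):
--             count+=1
--         elif d[i]=="-":
--             count-=1
--     return count
-- ===== SOURCE B (Python) =====
-- def f(d):
--     tally = {}
--     for ch in d:
--         tally[ch] = tally.get(ch, 0) + 1
--     return tally.get("+", 0) - tally.get("-", 0)
-- ===== Notes on version B (the rewrite author's own statement) =====
-- stated objective: alternative
-- what changed: B replaces A's index-loop with a per-character branch accumulator by building a frequency table of all characters first and then returning the '+' tally minus the '-' tally (build-index-then-lookup).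
import Mathlib
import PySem

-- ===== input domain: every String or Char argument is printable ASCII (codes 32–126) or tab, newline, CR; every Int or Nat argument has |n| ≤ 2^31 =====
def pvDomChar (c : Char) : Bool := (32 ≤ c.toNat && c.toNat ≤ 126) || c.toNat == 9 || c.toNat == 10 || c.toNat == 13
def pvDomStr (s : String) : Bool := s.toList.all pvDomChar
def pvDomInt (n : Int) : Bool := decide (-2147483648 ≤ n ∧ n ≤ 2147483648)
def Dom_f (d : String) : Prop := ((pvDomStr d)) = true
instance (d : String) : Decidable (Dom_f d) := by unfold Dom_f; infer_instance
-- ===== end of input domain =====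

-- B builds a frequency table of all characters first, then returns tally('+') - tally('-'); alternative shape, same cost.

-- ===== PORT A =====
-- for i in range(len(d)): if d[i]=="+": count+=1 elif d[i]=="-": count-=1
def f (d : String) : Int :=
  (PySem.List.pyRange 0 (PySem.Str.len d)).foldl
    (fun count i =>
      let c := PySem.List.pyGetD d.toList i ' '   -- d[i]; index always in range here
      if c = '+' then count + 1
      else if c = '-' then count - 1
      else count) 0

-- ===== PORT B =====
-- tally = {}; for ch in d: tally[ch] = tally.get(ch, 0) + 1; return tally.get('+',0) - tally.get('-',0)
def f_alt (d : String) : Int :=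
  let tally := d.toList.foldl (fun t ch => t.insert ch (t.getD ch 0 + 1))
    (PySem.Dict.empty : PySem.Dict Char Int)
  tally.getD '+' 0 - tally.getD '-' 0

-- ===== PRECONDITION & SPEC =====
def Spec_f (d : String) (out : Int) : Prop := out = f_alt d
instance (d : String) (out : Int) : Decidable (Spec_f d out) := by unfold Spec_f; infer_instance

-- ===== CLAIM (what is proved, stated in full; the proofs are below) =====
def Claim_equal_f : Prop := ∀ (d : String), Dom_f d → Spec_f d (f d)

-- ===== LEMMAS AND PROOFS =====

-- A's select-and-accumulate loop computes (count of '+') - (count of '-').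
theorem foldl_pm (l : List Char) (a : Int) :
    l.foldl (fun count c =>
      if c = '+' then count + 1 else if c = '-' then count - 1 else count) a
      = a + (l.count '+' : Int) - (l.count '-' : Int) := by
  induction l generalizing a with
  | nil => simp
  | cons c l ih =>
    simp only [List.foldl_cons, List.count_cons, ih]
    by_cases h1 : c = '+' <;> by_cases h2 : c = '-' <;>
      simp [h1, h2] <;> omega

-- ===== VERDICT (by name: the statement is the Claim_ definition above) =====
theorem f_spec : Claim_equal_f := by
  intro d _
  unfold Spec_f f f_alt
  have hlen : PySem.Str.len d = PySem.List.len d.toList := by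
    simp [PySem.Str.len_eq]
  rw [hlen,
    PySem.List.foldl_pyRange_pyGetD d.toList ' '
      (fun count c =>
        if c = '+' then count + 1 else if c = '-' then count - 1 else count)
      0 (le_refl 0)]
  simp only [Int.toNat_zero, List.drop_zero, foldl_pm,
    PySem.Dict.getD_foldl_insert_add_one, PySem.Dict.getD_empty]
  omega
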